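-- pv_equiv track=rewrite | github.com/mishailka/TestTask | task1/main.py | find_array_path
-- ===== SOURCE A (Python) =====
-- def find_array_path(n, m):
--     path = []
--     curr = 1
--     while str(curr) not in path:
--         path.append(str(curr))
--         curr = (curr + m - 1) % n   #находим конец следующего по шагу массива
--         if curr == 0: # т.к массив от 1 до n, а выше я хожу по кругу при помощи остатка от деления то на конце массива получется 0 а не конец
--             curr = n
--     return ''.join(path)
-- ===== SOURCE B (Python) =====
-- def find_array_path(n, m):
--     # Closed form: the walk is the orbit of 1 under the shift +((m-1) % n) on Z_n,
--     # whose length is n // gcd(n, (m-1) % n); generate it directly, no membership scans.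
--     d = (m - 1) % n
--     g, r = n, d
--     while r:
--         g, r = r, g % r
--     p = n // g
--     return ''.join(str(i * d % n + 1) for i in range(p))
-- ===== Notes on version B (the rewrite author's own statement) =====
-- stated objective: faster
-- what changed: A grows a list and rescans it for membership each iteration to detect the repeat; B computes the orbit length n // gcd(n, (m-1) % n) once with Euclid's algorithm and emits the k-th visited cell as the closed form k*d % n + 1, with no membership scans.
-- outside the precondition, e.g. on find_array_path(-3, 2): A returns '1-1-3-2', B returns '1-10'; on find_array_path(-1, 5): A returns '1-1', B returns '1'
import Mathlib
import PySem

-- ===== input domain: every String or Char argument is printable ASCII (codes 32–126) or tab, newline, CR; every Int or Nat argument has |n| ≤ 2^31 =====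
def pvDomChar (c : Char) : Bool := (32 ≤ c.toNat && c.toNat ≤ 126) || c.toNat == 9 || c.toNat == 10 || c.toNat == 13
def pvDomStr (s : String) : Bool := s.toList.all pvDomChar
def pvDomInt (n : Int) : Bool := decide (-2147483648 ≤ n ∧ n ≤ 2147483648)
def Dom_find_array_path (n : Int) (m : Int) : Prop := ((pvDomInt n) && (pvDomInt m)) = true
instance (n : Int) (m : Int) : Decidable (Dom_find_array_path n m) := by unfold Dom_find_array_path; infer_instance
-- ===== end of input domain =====

-- B replaces A's membership-scanning while loop by the closed form of the orbit of 1 under the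
-- shift +((m-1) % n) on {1..n} (orbit length n // gcd(n, (m-1) % n)); objective: faster.

-- ===== PORT A =====
-- one iteration's update of curr: curr = (curr + m - 1) % n; if curr == 0: curr = n
def pvStepA (n : Int) (m : Int) (curr : Int) : Int :=
  let c := PySem.Int.mod (curr + m - 1) n
  if c = 0 then n else c

-- the while loop; the fuel only makes it total (inside Pre_ the loop stops before it runs out)
def pvLoopA (n : Int) (m : Int) : Nat → List String → Int → List String
  | 0, path, _ => path
  | fuel + 1, path, curr =>
      if PySem.Int.toStr curr ∈ path then path
      else pvLoopA n m fuel (path ++ [PySem.Int.toStr curr]) (pvStepA n m curr)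

def find_array_path (n : Int) (m : Int) : String :=
  PySem.Str.join "" (pvLoopA n m (n.natAbs + 2) [] 1)

-- ===== PORT B =====
-- termination helper for the Euclid loop (Python % has the divisor's sign, |g % r| < |r|)
theorem pvModNatAbsLt (g r : Int) (h : r ≠ 0) :
    (PySem.Int.mod g r).natAbs < r.natAbs := by
  rcases lt_trichotomy r 0 with hr | hr | hr
  · have := PySem.Int.mod_neg_bounds g hr
    omega
  · exact absurd hr h
  · have h1 := PySem.Int.mod_nonneg g hr
    have h2 := PySem.Int.mod_lt g hr
    omega

-- g, r = n, d; while r: g, r = r, g % r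
def pvGcdB (g : Int) (r : Int) : Int :=
  if h : r = 0 then g else pvGcdB r (PySem.Int.mod g r)
termination_by r.natAbs
decreasing_by exact pvModNatAbsLt g r h

def find_array_path_alt (n : Int) (m : Int) : String :=
  let d := PySem.Int.mod (m - 1) n
  let g := pvGcdB n d
  let p := PySem.Int.floordiv n g
  PySem.Str.join ""
    ((PySem.List.pyRange 0 p 1).map (fun i => PySem.Int.toStr (PySem.Int.mod (i * d) n + 1)))

-- ===== PRECONDITION & SPEC =====
-- Pre_ restricts to the natural domain of the task (an array with positions 1..n): n = 0 makes A
-- raise ZeroDivisionError (B raises there too), and n < 0 is outside the natural domain (A's value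
-- there is an accident of its wrap-around arithmetic; B returns a different value for n < 0).
def Pre_find_array_path (n : Int) (m : Int) : Prop := 1 ≤ n
instance (n : Int) (m : Int) : Decidable (Pre_find_array_path n m) := by unfold Pre_find_array_path; infer_instance
def pvWitness_find_array_path : Int × Int := (5, 2)

def Spec_find_array_path (n : Int) (m : Int) (out : String) : Prop := out = find_array_path_alt n m
instance (n : Int) (m : Int) (out : String) : Decidable (Spec_find_array_path n m out) := by unfold Spec_find_array_path; infer_instance

-- ===== CLAIM (what is proved, stated in full; the proofs are below) =====
def Claim_equal_find_array_path : Prop := ∀ (n : Int) (m : Int), Dom_find_array_path n m → Pre_find_array_path n m → Spec_find_array_path n m (find_array_path n m)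

-- ===== LEMMAS AND PROOFS =====

-- ---- decimal rendering is injective on positive integers ----

theorem pvToDigitsCore_eq (f : Nat) : ∀ (n : Nat) (l : List Char), 0 < n → n ≤ f →
    Nat.toDigitsCore 10 f n l = ((Nat.digits 10 n).map Nat.digitChar).reverse ++ l := by
  induction f with
  | zero => intro n l h1 h2; omega
  | succ f ih =>
    intro n l h1 h2
    rw [Nat.toDigitsCore]
    by_cases h : n / 10 = 0
    · have hn10 : n < 10 := by omega
      rw [if_pos h, Nat.digits_def' (by norm_num : (1:Nat) < 10) h1, h]
      simp [Nat.digits_zero, Nat.mod_eq_of_lt hn10]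
    · rw [if_neg h, ih (n / 10) _ (by omega) (by omega),
        Nat.digits_def' (by norm_num : (1:Nat) < 10) h1]
      simp

theorem pvDigitCharsInj : ∀ (l1 l2 : List Nat), (∀ x ∈ l1, x < 10) → (∀ x ∈ l2, x < 10) →
    l1.map Nat.digitChar = l2.map Nat.digitChar → l1 = l2 := by
  intro l1
  induction l1 with
  | nil => intro l2 _ _ h; cases l2 <;> simp_all
  | cons a t ih =>
    intro l2 h1 h2 h
    cases l2 with
    | nil => simp_all
    | cons b t2 =>
      simp only [List.map_cons, List.cons.injEq] at h
      have ha : a < 10 := h1 a (by simp)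
      have hb : b < 10 := h2 b (by simp)
      have key : ∀ x : Nat, x < 10 → ∀ y : Nat, y < 10 → Nat.digitChar x = Nat.digitChar y → x = y := by decide
      have hab : a = b := key a ha b hb h.1
      rw [hab, ih t2 (fun x hx => h1 x (by simp [hx])) (fun x hx => h2 x (by simp [hx])) h.2]

theorem pvToStrInjPos (a b : Int) (ha : 0 < a) (hb : 0 < b)
    (h : PySem.Int.toStr a = PySem.Int.toStr b) : a = b := by
  have h' : PySem.Int.toChars a = PySem.Int.toChars b := by
    rw [← PySem.Int.toList_toStr, ← PySem.Int.toList_toStr, h]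
  rw [PySem.Int.toChars, PySem.Int.toChars, if_neg (by omega), if_neg (by omega)] at h'
  rw [Nat.toDigits, Nat.toDigits,
    pvToDigitsCore_eq _ _ _ (by omega) (by omega),
    pvToDigitsCore_eq _ _ _ (by omega) (by omega)] at h'
  simp only [List.append_nil] at h'
  have hd : Nat.digits 10 a.toNat = Nat.digits 10 b.toNat :=
    pvDigitCharsInj _ _ (fun x hx => Nat.digits_lt_base (by norm_num) hx)
      (fun x hx => Nat.digits_lt_base (by norm_num) hx)
      (List.reverse_injective h')
  have := congrArg (Nat.ofDigits 10) hd
  rw [Nat.ofDigits_digits, Nat.ofDigits_digits] at this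
  omega

-- ---- number theory: N ∣ t*D ↔ (N / gcd N D) ∣ t ----

theorem pvDvdMulIff (N D t : Nat) (hN : 0 < N) :
    N ∣ t * D ↔ (N / Nat.gcd N D) ∣ t := by
  set g := Nat.gcd N D with hg
  have hgpos : 0 < g := Nat.gcd_pos_of_pos_left D hN
  have hNg : g * (N / g) = N := Nat.mul_div_cancel' (Nat.gcd_dvd_left N D)
  have hDg : g * (D / g) = D := Nat.mul_div_cancel' (Nat.gcd_dvd_right N D)
  have hco : Nat.Coprime (N / g) (D / g) := Nat.coprime_div_gcd_div_gcd hgpos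
  constructor
  · intro h
    rw [← hNg, ← hDg] at h
    have h2 : g * (N / g) ∣ g * (t * (D / g)) := by
      rwa [show t * (g * (D / g)) = g * (t * (D / g)) by ring] at h
    have h3 : (N / g) ∣ t * (D / g) := (Nat.mul_dvd_mul_iff_left hgpos).mp h2
    exact hco.dvd_of_dvd_mul_right h3
  · intro h
    rcases h with ⟨c, hc⟩
    refine ⟨c * (D / g), ?_⟩
    calc t * D = (N / g * c) * (g * (D / g)) := by rw [hc, hDg]
      _ = (g * (N / g)) * (c * (D / g)) := by ring
      _ = N * (c * (D / g)) := by rw [hNg]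

-- ---- the value of curr after k appends, at the Nat level ----

def pvVal (N D k : Nat) : Nat := k * D % N + 1

theorem pvValInj (N D : Nat) (hN : 0 < N) (a b : Nat) (hab : a ≤ b)
    (h : pvVal N D a = pvVal N D b) : (N / Nat.gcd N D) ∣ (b - a) := by
  have h' : a * D % N = b * D % N := by unfold pvVal at h; omega
  have hle : a * D ≤ b * D := Nat.mul_le_mul_right D hab
  have hdvd : N ∣ b * D - a * D := (Nat.modEq_iff_dvd' hle).mp h'
  rw [← Nat.sub_mul] at hdvd
  exact (pvDvdMulIff N D (b - a) hN).mp hdvd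

-- ---- gcd loop correctness ----

theorem pvGcdB_eq (B : Nat) : ∀ (A : Nat), pvGcdB (A : Int) (B : Int) = (Nat.gcd A B : Int) := by
  induction B using Nat.strong_induction_on with
  | _ B ih =>
    intro A
    rw [pvGcdB]
    by_cases hB : B = 0
    · subst hB; simp
    · rw [dif_neg (by exact_mod_cast hB), PySem.Int.mod_natCast,
        ih (A % B) (Nat.mod_lt A (by omega)) B]
      rw [Nat.gcd_comm A B, Nat.gcd_rec B A, Nat.gcd_comm (A % B) B]

-- ---- the step function advances pvVal ----

theorem pvStepA_val (n m : Int) (hn : 1 ≤ n) (j : Nat) :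
    pvStepA n m ((pvVal n.toNat (PySem.Int.mod (m - 1) n).toNat j : Nat) : Int)
      = ((pvVal n.toNat (PySem.Int.mod (m - 1) n).toNat (j + 1) : Nat) : Int) := by
  have hn0 : (0:Int) < n := by omega
  set d := PySem.Int.mod (m - 1) n with hd
  have hd0 : 0 ≤ d := PySem.Int.mod_nonneg _ hn0
  have hdlt : d < n := PySem.Int.mod_lt _ hn0
  have hD : ((d.toNat : Int)) = d := Int.toNat_of_nonneg hd0
  have hN : ((n.toNat : Int)) = n := Int.toNat_of_nonneg (by omega)
  have hcast : ∀ k : Nat, (((k * d.toNat % n.toNat : Nat) : Int)) = ((k : Int) * d) % n := by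
    intro k; push_cast [hD, hN]; ring_nf
  have hE0 : 0 ≤ ((j:Int)+1) * d % n := Int.emod_nonneg _ (by omega)
  have hElt : ((j:Int)+1) * d % n < n := Int.emod_lt_of_pos _ hn0
  have key : ((j:Int) * d % n + 1 + m - 1) % n = (((j:Int)+1) * d % n + 1) % n := by
    have c1 : ((j:Int) * d) % n ≡ (j:Int) * d [ZMOD n] := Int.emod_emod _ _
    have c2 : (m - 1) ≡ d [ZMOD n] := by
      rw [hd, PySem.Int.mod_eq_emod_of_pos hn0]
      exact (Int.emod_emod _ _).symm
    have c3 : (((j:Int)+1) * d) % n ≡ ((j:Int)+1) * d [ZMOD n] := Int.emod_emod _ _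
    calc ((j:Int) * d % n + 1 + m - 1)
        = ((j:Int) * d % n) + (m - 1) + 1 := by ring
      _ ≡ ((j:Int) * d) + d + 1 [ZMOD n] := ((c1.add c2).add_right 1)
      _ = ((j:Int) + 1) * d + 1 := by ring
      _ ≡ (((j:Int)+1) * d) % n + 1 [ZMOD n] := (c3.symm.add_right 1)
  unfold pvStepA pvVal
  rw [PySem.Int.mod_eq_emod_of_pos hn0]
  push_cast [hcast (j+1), hcast j]
  rw [key]
  by_cases htop : ((j:Int)+1) * d % n + 1 = n
  · rw [htop, Int.emod_self, if_pos rfl]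
  · rw [Int.emod_eq_of_lt (by omega) (by omega), if_neg (by omega)]

-- ---- abbreviations for the run of the loop ----

def pvD (n m : Int) : Nat := (PySem.Int.mod (m - 1) n).toNat
def pvL (n m : Int) : Nat := n.toNat / Nat.gcd n.toNat (pvD n m)
def pvStr (n m : Int) (k : Nat) : String :=
  PySem.Int.toStr ((pvVal n.toNat (pvD n m) k : Nat) : Int)

theorem pvVal_pos (N D k : Nat) : 0 < pvVal N D k := by unfold pvVal; omega

theorem pvL_pos (n m : Int) (hn : 1 ≤ n) : 0 < pvL n m := by
  have hN : 0 < n.toNat := by omega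
  exact Nat.div_pos (Nat.le_of_dvd hN (Nat.gcd_dvd_left _ _)) (Nat.gcd_pos_of_pos_left _ hN)

theorem pvL_le (n m : Int) : pvL n m ≤ n.toNat := Nat.div_le_self _ _

theorem pvVal_L (n m : Int) (hn : 1 ≤ n) :
    pvVal n.toNat (pvD n m) (pvL n m) = pvVal n.toNat (pvD n m) 0 := by
  have hN : 0 < n.toNat := by omega
  have hdvd : n.toNat ∣ pvL n m * pvD n m :=
    (pvDvdMulIff n.toNat (pvD n m) (pvL n m) hN).mpr dvd_rfl
  unfold pvVal
  rw [Nat.mod_eq_zero_of_dvd hdvd]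
  simp

theorem pvLoopA_run (n m : Int) (hn : 1 ≤ n) : ∀ (fuel j : Nat), j ≤ pvL n m → pvL n m - j < fuel →
    pvLoopA n m fuel ((List.range j).map (pvStr n m)) ((pvVal n.toNat (pvD n m) j : Nat) : Int)
      = (List.range (pvL n m)).map (pvStr n m) := by
  intro fuel
  induction fuel with
  | zero => intro j h1 h2; omega
  | succ fuel ih =>
    intro j h1 h2
    rw [pvLoopA]
    by_cases hj : j = pvL n m
    · subst hj
      rw [if_pos ?_]
      have h0 : pvStr n m (pvL n m) = pvStr n m 0 := by
        unfold pvStr; rw [pvVal_L n m hn]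
      show PySem.Int.toStr _ ∈ _
      have : pvStr n m (pvL n m) ∈ (List.range (pvL n m)).map (pvStr n m) := by
        rw [h0]
        exact List.mem_map.mpr ⟨0, List.mem_range.mpr (pvL_pos n m hn), rfl⟩
      exact this
    · have hjL : j < pvL n m := by omega
      rw [if_neg ?_]
      · have hstep : pvStepA n m ((pvVal n.toNat (pvD n m) j : Nat) : Int)
            = ((pvVal n.toNat (pvD n m) (j+1) : Nat) : Int) := pvStepA_val n m hn j
        rw [hstep, show (List.range j).map (pvStr n m) ++ [PySem.Int.toStr ((pvVal n.toNat (pvD n m) j : Nat) : Int)]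
            = (List.range (j+1)).map (pvStr n m) by rw [List.range_succ, List.map_append]; rfl]
        exact ih (j+1) (by omega) (by omega)
      · intro hmem
        obtain ⟨i, hi, heq⟩ := List.mem_map.mp hmem
        rw [List.mem_range] at hi
        have hvv : pvVal n.toNat (pvD n m) i = pvVal n.toNat (pvD n m) j := by
          have := pvToStrInjPos _ _ (by exact_mod_cast pvVal_pos _ _ i) (by exact_mod_cast pvVal_pos _ _ j) heq
          exact_mod_cast this
        have hdvd := pvValInj n.toNat (pvD n m) (by omega) i j (by omega) hvv
        have : pvL n m ≤ j - i := Nat.le_of_dvd (by omega) hdvd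
        omega

-- ===== VERDICT (by name: the statement is the Claim_ definition above) =====
theorem find_array_path_spec : Claim_equal_find_array_path := by
  intro n m _ hpre
  obtain ⟨N, rfl⟩ : ∃ N : Nat, n = ((N : Nat) : Int) :=
    ⟨n.toNat, (Int.toNat_of_nonneg (le_trans Int.one_nonneg hpre)).symm⟩
  have hn : 1 ≤ ((N : Nat) : Int) := hpre
  have hN1 : 1 ≤ N := by exact_mod_cast hn
  unfold Spec_find_array_path
  have hn0 : (0:Int) < ((N : Nat) : Int) := by omega
  have hd0 : 0 ≤ PySem.Int.mod (m - 1) ((N : Nat) : Int) := PySem.Int.mod_nonneg _ hn0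
  have hD : ((pvD ((N : Nat) : Int) m : Nat) : Int) = PySem.Int.mod (m - 1) ((N : Nat) : Int) :=
    Int.toNat_of_nonneg hd0
  -- A's loop produces the orbit list
  have hA : find_array_path ((N : Nat) : Int) m
      = PySem.Str.join "" ((List.range (pvL ((N : Nat) : Int) m)).map (pvStr ((N : Nat) : Int) m)) := by
    unfold find_array_path
    have h0 : ([] : List String) = (List.range 0).map (pvStr ((N : Nat) : Int) m) := rfl
    have h1 : (1:Int) = ((pvVal ((N : Nat) : Int).toNat (pvD ((N : Nat) : Int) m) 0 : Nat) : Int) := by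
      unfold pvVal; simp
    rw [h0, h1, pvLoopA_run ((N : Nat) : Int) m hn (((N : Nat) : Int).natAbs + 2) 0 (by omega)
      (by have := pvL_le ((N : Nat) : Int) m; simp only [Int.toNat_natCast, Int.natAbs_natCast] at *; omega)]
  -- B's closed form produces the same list
  have hB : find_array_path_alt ((N : Nat) : Int) m
      = PySem.Str.join "" ((List.range (pvL ((N : Nat) : Int) m)).map (pvStr ((N : Nat) : Int) m)) := by
    have hBdef : find_array_path_alt ((N : Nat) : Int) m = PySem.Str.join ""
        ((PySem.List.pyRange 0 (PySem.Int.floordiv ((N : Nat) : Int)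
            (pvGcdB ((N : Nat) : Int) (PySem.Int.mod (m - 1) ((N : Nat) : Int)))) 1).map
          (fun i => PySem.Int.toStr
            (PySem.Int.mod (i * PySem.Int.mod (m - 1) ((N : Nat) : Int)) ((N : Nat) : Int) + 1))) := rfl
    have hgc : pvGcdB ((N : Nat) : Int) (PySem.Int.mod (m - 1) ((N : Nat) : Int))
        = ((Nat.gcd N (pvD ((N : Nat) : Int) m) : Nat) : Int) := by
      have := pvGcdB_eq (pvD ((N : Nat) : Int) m) N
      rwa [hD] at this
    have hp : PySem.Int.floordiv ((N : Nat) : Int) ((Nat.gcd N (pvD ((N : Nat) : Int) m) : Nat) : Int)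
        = ((pvL ((N : Nat) : Int) m : Nat) : Int) := by
      have := PySem.Int.floordiv_natCast N (Nat.gcd N (pvD ((N : Nat) : Int) m))
      rw [this]
      unfold pvL
      simp
    rw [hBdef, hgc, hp, PySem.List.pyRange_one]
    congr 1
    have hLt : (((pvL ((N : Nat) : Int) m : Nat) : Int) - 0).toNat = pvL ((N : Nat) : Int) m := by omega
    rw [hLt, List.map_map]
    apply List.map_congr_left
    intro k _
    show PySem.Int.toStr (PySem.Int.mod ((0 + (k:Int)) * PySem.Int.mod (m - 1) ((N : Nat) : Int)) ((N : Nat) : Int) + 1)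
        = pvStr ((N : Nat) : Int) m k
    unfold pvStr pvVal
    congr 1
    rw [zero_add, ← hD]
    rw [show ((k:Int)) * ((pvD ((N : Nat) : Int) m : Nat) : Int)
        = (((k * pvD ((N : Nat) : Int) m : Nat) : Int)) by push_cast; ring,
      PySem.Int.mod_natCast]
    push_cast
    simp
  rw [hA, hB]
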